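-- pv_equiv track=rewrite | github.com/cnc-n3r4/Isaac | isaac/core/routing/pipe_strategy.py | _is_quoted_pipe
-- ===== SOURCE A (Python) =====
-- def _is_quoted_pipe(cmd: str) -> bool:
--     """Check if all pipes are inside quotes."""
--     in_quotes = False
--     quote_char = None
--
--     for char in cmd:
--         if char in ('"', "'") and not in_quotes:
--             in_quotes = True
--             quote_char = char
--         elif char == quote_char and in_quotes:
--             in_quotes = False
--             quote_char = None
--         elif char == "|" and not in_quotes:
--             return False  # Found pipe outside quotes
--
--     return True  # All pipes are quoted
-- ===== SOURCE B (Python) =====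
-- def _is_quoted_pipe(cmd: str) -> bool:
--     """Check if all pipes are inside quotes."""
--     i = 0
--     n = len(cmd)
--     while i < n:
--         c = cmd[i]
--         if c == '"' or c == "'":
--             j = cmd.find(c, i + 1)
--             if j == -1:
--                 return True  # unterminated quote: the rest is quoted
--             i = j + 1
--         elif c == '|':
--             return False
--         else:
--             i += 1
--     return True
-- ===== Notes on version B (the rewrite author's own statement) =====
-- stated objective: alternative
-- what changed: Replaces A's per-character quote-state machine (in_quotes/quote_char flags) with an index loop that, on seeing a quote, jumps directly past the matching close quote via str.find, so no quoting state is maintained.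
import Mathlib
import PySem

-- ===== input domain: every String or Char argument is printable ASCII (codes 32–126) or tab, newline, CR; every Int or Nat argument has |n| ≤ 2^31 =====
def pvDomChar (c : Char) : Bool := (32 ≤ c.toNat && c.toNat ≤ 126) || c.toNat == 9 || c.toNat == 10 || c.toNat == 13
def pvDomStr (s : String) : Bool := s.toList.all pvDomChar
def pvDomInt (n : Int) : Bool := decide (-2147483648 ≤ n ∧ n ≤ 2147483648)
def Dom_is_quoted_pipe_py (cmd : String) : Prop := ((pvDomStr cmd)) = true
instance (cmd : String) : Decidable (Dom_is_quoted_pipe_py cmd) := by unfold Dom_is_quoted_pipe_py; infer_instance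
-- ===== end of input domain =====

-- B replaces A's per-character quote-state machine with a skip-to-closing-quote scan; same O(n), alternative structure.

-- ===== PORT A =====
-- state machine: in_quotes flag and quote_char (Option Char, none = Python None)
def pvGoA : List Char → Bool → Option Char → Bool
  | [], _, _ => true
  | c :: rest, inq, qc =>
    if (c = '"' ∨ c = '\'') ∧ inq = false then pvGoA rest true (some c)
    else if some c = qc ∧ inq = true then pvGoA rest false none
    else if c = '|' ∧ inq = false then false
    else pvGoA rest inq qc

def is_quoted_pipe_py (cmd : String) : Bool := pvGoA cmd.toList false none

-- ===== PORT B =====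
-- cmd.find(c, i+1): drop everything up to and including the first occurrence of q; none = not found
def pvSkipTo (q : Char) : List Char → Option (List Char)
  | [] => none
  | x :: xs => if x = q then some xs else pvSkipTo q xs

theorem pvSkipTo_length {q : Char} : ∀ {l r : List Char}, pvSkipTo q l = some r → r.length < l.length
  | [], _, h => by simp [pvSkipTo] at h
  | x :: xs, r, h => by
    by_cases hx : x = q
    · simp [pvSkipTo, hx] at h; simp [← h]
    · simp [pvSkipTo, hx] at h
      exact Nat.lt_trans (pvSkipTo_length h) (by simp)

def pvGoB : List Char → Bool
  | [] => true
  | c :: rest =>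
    if c = '"' ∨ c = '\'' then
      match hskip : pvSkipTo c rest with
      | none => true
      | some rest' => pvGoB rest'
    else if c = '|' then false
    else pvGoB rest
termination_by l => l.length
decreasing_by
  · exact Nat.lt_succ_of_lt (pvSkipTo_length hskip)
  · simp

def is_quoted_pipe_py_alt (cmd : String) : Bool := pvGoB cmd.toList

-- ===== PRECONDITION & SPEC =====
def Spec_is_quoted_pipe_py (cmd : String) (out : Bool) : Prop := out = is_quoted_pipe_py_alt cmd
instance (cmd : String) (out : Bool) : Decidable (Spec_is_quoted_pipe_py cmd out) := by unfold Spec_is_quoted_pipe_py; infer_instance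

-- ===== CLAIM (what is proved, stated in full; the proofs are below) =====
def Claim_equal_is_quoted_pipe_py : Prop := ∀ (cmd : String), Dom_is_quoted_pipe_py cmd → Spec_is_quoted_pipe_py cmd (is_quoted_pipe_py cmd)

-- ===== LEMMAS AND PROOFS =====
-- inside quotes, A just scans for the closing quote: that is exactly pvSkipTo
theorem pvGoA_inQuotes (q : Char) : ∀ (l : List Char),
    pvGoA l true (some q) =
      (match pvSkipTo q l with
       | none => true
       | some r => pvGoA r false none)
  | [] => by simp [pvGoA, pvSkipTo]
  | c :: rest => by
    by_cases hc : c = q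
    · simp [pvGoA, pvSkipTo, hc]
    · simp only [pvGoA, pvSkipTo]
      simp [hc]
      exact pvGoA_inQuotes q rest

theorem pvGoA_eq_pvGoB : ∀ (l : List Char), pvGoA l false none = pvGoB l
  | [] => by simp [pvGoA, pvGoB]
  | c :: rest => by
    by_cases hq : c = '"' ∨ c = '\''
    · rw [pvGoB]
      simp only [pvGoA, hq, true_and]
      rw [pvGoA_inQuotes c rest]
      cases h : pvSkipTo c rest with
      | none => simp
      | some r =>
        simp only [if_true]
        have : r.length < rest.length := pvSkipTo_length h
        simpa using pvGoA_eq_pvGoB r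
    · by_cases hp : c = '|'
      · simp [pvGoA, pvGoB, hp]
      · rw [pvGoB]
        simp only [pvGoA, hq, false_and]
        simp [hp]
        exact pvGoA_eq_pvGoB rest
termination_by l => l.length
decreasing_by
  · exact Nat.lt_succ_of_lt ‹r.length < rest.length›
  · simp

-- ===== VERDICT (by name: the statement is the Claim_ definition above) =====
theorem is_quoted_pipe_py_spec : Claim_equal_is_quoted_pipe_py := by
  intro cmd _
  unfold Spec_is_quoted_pipe_py is_quoted_pipe_py is_quoted_pipe_py_alt
  exact pvGoA_eq_pvGoB cmd.toList
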